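-- pv_equiv track=rewrite | github.com/Trilian/assistant_matanne | src/modules/famille/routines_utils.py | grouper_par_moment
-- ===== SOURCE A (Python) =====
-- from collections import defaultdict
--
-- MOMENTS_JOURNEE: list[str] = [
--     "Matin",
--     "Midi",
--     "Après-midi",
--     "Soir",
--     "Nuit",
-- ]
--
-- def grouper_par_moment(routines: list[dict]) -> dict[str, list[dict]]:
--     """Groupe les routines par moment de la journée.
--
--     Les moments inconnus sont regroupés sous 'Autre'.
--
--     Args:
--         routines: Liste de dicts avec clé 'moment'.
--
--     Returns:
--         Dict {moment: [routines]}.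
--     """
--     groupes: dict[str, list[dict]] = defaultdict(list)
--     for r in routines:
--         moment = r.get("moment", "Autre")
--         if moment not in MOMENTS_JOURNEE:
--             moment = "Autre"
--         groupes[moment].append(r)
--     return dict(groupes)
-- ===== SOURCE B (Python) =====
-- MOMENTS_JOURNEE: list[str] = [
--     "Matin",
--     "Midi",
--     "Après-midi",
--     "Soir",
--     "Nuit",
-- ]
--
-- def grouper_par_moment(routines: list[dict]) -> dict[str, list[dict]]:
--     """Groupe les routines par moment de la journée (moments inconnus -> 'Autre')."""
--     def norm(r):
--         m = r.get("moment", "Autre")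
--         return m if m in MOMENTS_JOURNEE else "Autre"
--     moments = []
--     for r in routines:
--         m = norm(r)
--         if m not in moments:
--             moments.append(m)
--     return {m: [r for r in routines if norm(r) == m] for m in moments}
-- ===== Notes on version B (the rewrite author's own statement) =====
-- stated objective: alternative
-- what changed: Replaced the single-pass defaultdict accumulation with a keyset-then-filter structure: first collect the distinct normalized moments in first-appearance order, then build each group by filtering the routine list per moment.
import Mathlib
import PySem

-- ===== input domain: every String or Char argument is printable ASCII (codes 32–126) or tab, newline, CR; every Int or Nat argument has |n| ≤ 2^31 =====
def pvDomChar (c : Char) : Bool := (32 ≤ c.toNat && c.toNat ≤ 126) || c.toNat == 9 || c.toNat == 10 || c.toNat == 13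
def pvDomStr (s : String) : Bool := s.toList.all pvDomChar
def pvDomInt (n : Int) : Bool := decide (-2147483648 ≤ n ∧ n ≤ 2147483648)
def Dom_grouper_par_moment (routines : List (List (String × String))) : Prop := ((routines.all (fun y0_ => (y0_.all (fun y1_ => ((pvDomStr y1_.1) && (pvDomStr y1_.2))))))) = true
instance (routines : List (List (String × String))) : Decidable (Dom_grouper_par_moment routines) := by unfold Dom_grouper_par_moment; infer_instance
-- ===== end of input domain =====

-- B groups by first collecting the distinct normalized moments, then filtering the list once per moment (alternative decomposition, same cost).


-- ===== PORT A =====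
def MOMENTS_JOURNEE : List String := ["Matin", "Midi", "Après-midi", "Soir", "Nuit"]

-- moment = r.get("moment", "Autre"); if moment not in MOMENTS_JOURNEE: moment = "Autre"
def normMoment (r : List (String × String)) : String :=
  let moment := (PySem.Dict.mk r).getD "moment" "Autre"
  if MOMENTS_JOURNEE.contains moment then moment else "Autre"

def grouper_par_moment (routines : List (List (String × String))) : List (String × List (List (String × String))) :=
  -- defaultdict(list); groupes[moment].append(r) == modify moment [] (· ++ [r]); dict(groupes) returns the items
  (routines.foldl (fun groupes r => groupes.modify (normMoment r) [] (fun g => g ++ [r]))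
    (PySem.Dict.empty : PySem.Dict String (List (List (String × String))))).items

-- ===== PORT B =====
def grouper_par_moment_alt (routines : List (List (String × String))) : List (String × List (List (String × String))) :=
  -- moments = distinct normalized moments in first-appearance order
  let moments : PySem.Set String :=
    routines.foldl (fun acc r => PySem.Set.add acc (normMoment r)) PySem.Set.empty
  moments.map (fun m => (m, routines.filter (fun r => normMoment r == m)))

-- ===== PRECONDITION & SPEC =====
def Spec_grouper_par_moment (routines : List (List (String × String))) (out : List (String × List (List (String × String)))) : Prop := out = grouper_par_moment_alt routines
instance (routines : List (List (String × String))) (out : List (String × List (List (String × String)))) : Decidable (Spec_grouper_par_moment routines out) := by unfold Spec_grouper_par_moment; infer_instance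

-- ===== CLAIM (what is proved, stated in full; the proofs are below) =====
def Claim_equal_grouper_par_moment : Prop := ∀ (routines : List (List (String × String))), Dom_grouper_par_moment routines → Spec_grouper_par_moment routines (grouper_par_moment routines)

-- ===== LEMMAS AND PROOFS =====

theorem groupDict_keys (routines : List (List (String × String))) :
    (routines.foldl (fun groupes r => groupes.modify (normMoment r) [] (fun g => g ++ [r]))
      (PySem.Dict.empty : PySem.Dict String (List (List (String × String))))).keys
    = PySem.Set.ofList (routines.map normMoment) := by
  rw [PySem.Dict.keys_foldl_modify_key]
  simp [PySem.Set.update_nil_left]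

theorem groupDict_keys_nodup (routines : List (List (String × String))) :
    (routines.foldl (fun groupes r => groupes.modify (normMoment r) [] (fun g => g ++ [r]))
      (PySem.Dict.empty : PySem.Dict String (List (List (String × String))))).keys.Nodup := by
  rw [groupDict_keys]; exact PySem.Set.nodup_ofList _

theorem groupDict_getD (routines : List (List (String × String))) (c : String) :
    (routines.foldl (fun groupes r => groupes.modify (normMoment r) [] (fun g => g ++ [r]))
      (PySem.Dict.empty : PySem.Dict String (List (List (String × String))))).getD c []
    = routines.filter (fun r => normMoment r == c) := by
  have h := PySem.Dict.getD_foldl_modify_append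
    (l := routines.map (fun r => (normMoment r, r)))
    (d := (PySem.Dict.empty : PySem.Dict String (List (List (String × String))))) (c := c)
  rw [List.foldl_map] at h
  rw [h]
  rw [List.filter_map, List.map_map]
  simp [Function.comp_def]

theorem momentsB_eq (routines : List (List (String × String))) :
    routines.foldl (fun acc r => PySem.Set.add acc (normMoment r)) PySem.Set.empty
    = PySem.Set.ofList (routines.map normMoment) := by
  rw [← PySem.Set.update_map_eq_foldl_add]
  exact PySem.Set.update_nil_left _

-- ===== VERDICT (by name: the statement is the Claim_ definition above) =====
theorem grouper_par_moment_spec : Claim_equal_grouper_par_moment := by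
  intro routines _
  unfold Spec_grouper_par_moment grouper_par_moment grouper_par_moment_alt
  rw [PySem.Dict.items_eq_map_keys _ (groupDict_keys_nodup routines) ([] : List (List (String × String))),
      groupDict_keys, momentsB_eq]
  refine List.map_congr_left ?_
  intro m _
  rw [groupDict_getD]
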